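-- pv_equiv track=rewrite | github.com/StarSein/BaekJoon | 백준/Gold/17612. 쇼핑몰/쇼핑몰.py | solution
-- ===== SOURCE A (Python) =====
-- from typing import List, Tuple
-- import heapq
--
-- def solution(N: int, K: int, users: List[Tuple[int, int]]) -> int:
--     heap = [(0, i) for i in range(1, K + 1)]
--     deploy_list = []
--     for user_id, pay_num in users:
--         end_time, cashier_id = heapq.heappop(heap)
--
--         end_time += pay_num
--         deploy_list.append((end_time, cashier_id, user_id))
--
--         heapq.heappush(heap, (end_time, cashier_id))
--
--     deploy_list.sort(key= lambda x: (x[0], -x[1]))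
--
--     return sum(i * ui for i, (et, ci, ui) in enumerate(deploy_list, start=1))
-- ===== SOURCE B (Python) =====
-- from typing import List, Tuple
--
-- def solution(N: int, K: int, users: List[Tuple[int, int]]) -> int:
--     end_times = [0] * K
--     deploy_list = []
--     for user_id, pay_num in users:
--         j = 0
--         for i in range(1, len(end_times)):
--             if end_times[i] < end_times[j]:
--                 j = i
--         end_times[j] += pay_num
--         deploy_list.append((end_times[j], j + 1, user_id))
--
--     deploy_list.sort(key=lambda x: (x[0], -x[1]))
--
--     return sum(i * ui for i, (et, ci, ui) in enumerate(deploy_list, start=1))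
-- ===== Notes on version B (the rewrite author's own statement) =====
-- stated objective: simpler
-- what changed: Replaces the heapq priority queue of (end_time, cashier_id) pairs with a plain array of end times indexed by cashier, picking the next cashier by a linear argmin scan (strict < so ties go to the smallest id, matching the heap's lexicographic order); the final sort and weighted sum are unchanged.
import Mathlib
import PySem

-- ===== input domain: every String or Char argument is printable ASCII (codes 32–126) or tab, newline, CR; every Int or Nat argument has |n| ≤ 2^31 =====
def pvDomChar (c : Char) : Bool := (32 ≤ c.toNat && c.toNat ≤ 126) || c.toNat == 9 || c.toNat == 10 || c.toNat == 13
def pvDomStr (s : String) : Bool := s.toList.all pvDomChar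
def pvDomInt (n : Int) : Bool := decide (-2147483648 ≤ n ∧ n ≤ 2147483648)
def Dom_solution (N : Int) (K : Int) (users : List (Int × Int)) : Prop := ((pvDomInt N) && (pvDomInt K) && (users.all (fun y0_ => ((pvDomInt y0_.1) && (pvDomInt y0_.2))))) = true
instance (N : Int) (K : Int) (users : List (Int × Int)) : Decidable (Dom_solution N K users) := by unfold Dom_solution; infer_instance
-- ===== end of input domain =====

-- B replaces A's heapq priority queue by a per-cashier array of end times with a
-- linear argmin scan (strict <, so ties go to the smallest cashier id, like the
-- heap's lexicographic order); objective: simpler.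

-- ===== PORT A =====
-- Both Python sources end with the IDENTICAL two lines (sort by (end_time, -cashier_id),
-- then the weighted sum); this shared helper is the literal port of that common tail.
def pvFinish (deploy : List (Int × Int × Int)) : Int :=
  let d := PySem.List.sorted2 deploy (fun x => x.1) (fun x => -x.2.1) false
  (PySem.List.enumerate d 1).foldl (fun acc p => acc + p.1 * p.2.2.2) 0

-- the for-loop of A: heapq.heappop is ported by its contract (pop the lexicographically
-- smallest (end_time, cashier_id) pair), heapq.heappush appends the new pair;
-- none = the IndexError heappop raises on an empty heap.
def solLoopA : List (Int × Int) → List (Int × Int) → List (Int × Int × Int) →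
    Option (List (Int × Int) × List (Int × Int × Int))
  | [], heap, deploy => some (heap, deploy)
  | (user_id, pay_num) :: rest, heap, deploy =>
    match PySem.List.min2? heap Prod.fst Prod.snd with
    | none => none
    | some (end_time, cashier_id) =>
      let end_time' := end_time + pay_num
      solLoopA rest (heap.erase (end_time, cashier_id) ++ [(end_time', cashier_id)])
        (deploy ++ [(end_time', cashier_id, user_id)])

def solution (N : Int) (K : Int) (users : List (Int × Int)) : Int :=
  let heap := (PySem.List.pyRange 1 (K + 1) 1).map (fun i => ((0 : Int), i))
  match solLoopA users heap [] with
  | none => 0           -- heappop raised IndexError (outside Pre_)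
  | some (_, deploy) => pvFinish deploy

-- ===== PORT B =====
-- j = 0; for i in range(1, len(end_times)): if end_times[i] < end_times[j]: j = i
def bArgmin (ets : List Int) : Int :=
  (PySem.List.pyRange 1 (ets.length : Int) 1).foldl
    (fun j i => if PySem.List.pyGetD ets i 0 < PySem.List.pyGetD ets j 0 then i else j) 0

def solLoopB : List (Int × Int) → List Int → List (Int × Int × Int) → List (Int × Int × Int)
  | [], _, deploy => deploy
  | (user_id, pay_num) :: rest, ets, deploy =>
    let j := bArgmin ets
    let newEt := PySem.List.pyGetD ets j 0 + pay_num
    solLoopB rest (ets.set j.toNat newEt) (deploy ++ [(newEt, j + 1, user_id)])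

def solution_alt (N : Int) (K : Int) (users : List (Int × Int)) : Int :=
  pvFinish (solLoopB users (List.replicate K.toNat 0) [])

-- ===== PRECONDITION & SPEC =====
-- Pre_ excludes only the inputs on which A raises: with K ≤ 0 and a nonempty user list
-- both Pythons hit an empty queue/array and raise IndexError.
def Pre_solution (N : Int) (K : Int) (users : List (Int × Int)) : Prop := users = [] ∨ 1 ≤ K
instance (N : Int) (K : Int) (users : List (Int × Int)) : Decidable (Pre_solution N K users) := by unfold Pre_solution; infer_instance

def pvWitness_solution : Int × Int × (List (Int × Int)) := (3, 2, [(1, 5), (2, 3), (3, 2)])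

def Spec_solution (N : Int) (K : Int) (users : List (Int × Int)) (out : Int) : Prop := out = solution_alt N K users
instance (N : Int) (K : Int) (users : List (Int × Int)) (out : Int) : Decidable (Spec_solution N K users out) := by unfold Spec_solution; infer_instance

-- ===== CLAIM (what is proved, stated in full; the proofs are below) =====
def Claim_equal_solution : Prop := ∀ (N : Int) (K : Int) (users : List (Int × Int)), Dom_solution N K users → Pre_solution N K users → Spec_solution N K users (solution N K users)

-- ===== LEMMAS AND PROOFS =====

-- strict lexicographic order on (end_time, cashier_id) pairs
def pvLexLt (a b : Int × Int) : Prop := a.1 < b.1 ∨ (a.1 = b.1 ∧ a.2 < b.2)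

theorem pvLexLt_irrefl (a : Int × Int) : ¬ pvLexLt a a := by
  unfold pvLexLt; omega

theorem pvLexLt_antisymm {a b : Int × Int} (h1 : ¬ pvLexLt a b) (h2 : ¬ pvLexLt b a) : a = b := by
  unfold pvLexLt at h1 h2
  obtain ⟨a1, a2⟩ := a; obtain ⟨b1, b2⟩ := b
  simp only [Prod.mk.injEq]
  omega

theorem pvLexLt_not_trans {a b c : Int × Int} (h1 : ¬ pvLexLt b a) (h2 : ¬ pvLexLt c b) : ¬ pvLexLt c a := by
  unfold pvLexLt at *; omega

-- the fold step inside PySem.List.min2? with keys fst/snd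
def pvF (acc : Option (Int × Int)) (x : Int × Int) : Option (Int × Int) :=
  match acc with
  | none => some x
  | some m =>
    if (decide (x.1 < m.1) || (!decide (m.1 < x.1) && decide (x.2 < m.2))) = true then some x else some m

theorem min2?_eq_foldl_pvF (xs : List (Int × Int)) :
    PySem.List.min2? xs Prod.fst Prod.snd = xs.foldl pvF none := by
  unfold PySem.List.min2? pvF
  congr 1
  funext acc x
  cases acc <;> rfl

theorem pvF_cond_iff (x m : Int × Int) :
    ((decide (x.1 < m.1) || (!decide (m.1 < x.1) && decide (x.2 < m.2))) = true) ↔ pvLexLt x m := by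
  unfold pvLexLt
  simp only [Bool.or_eq_true, Bool.and_eq_true, Bool.not_eq_true', decide_eq_true_eq,
    decide_eq_false_iff_not]
  omega

theorem pvF_some (m x : Int × Int) :
    pvF (some m) x =
      if (decide (x.1 < m.1) || (!decide (m.1 < x.1) && decide (x.2 < m.2))) = true then some x else some m := rfl

theorem pvF_some_pos {m x : Int × Int} (h : pvLexLt x m) : pvF (some m) x = some x := by
  rw [pvF_some, if_pos ((pvF_cond_iff x m).mpr h)]

theorem pvF_some_neg {m x : Int × Int} (h : ¬ pvLexLt x m) : pvF (some m) x = some m := by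
  rw [pvF_some, if_neg (fun hc => h ((pvF_cond_iff x m).mp hc))]

theorem pvF_isSome (acc : Option (Int × Int)) (x : Int × Int) : (pvF acc x).isSome := by
  unfold pvF
  cases acc with
  | none => rfl
  | some m => dsimp only; split <;> rfl

theorem pvMinFold_isSome (xs : List (Int × Int)) : ∀ (acc : Option (Int × Int)),
    acc.isSome → (xs.foldl pvF acc).isSome := by
  induction xs with
  | nil => intro acc h; simpa using h
  | cons x t ih =>
    intro acc _
    simp only [List.foldl_cons]
    exact ih (pvF acc x) (pvF_isSome acc x)

theorem pvMinFold_spec (xs : List (Int × Int)) : ∀ (acc : Option (Int × Int)) (r : Int × Int),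
    xs.foldl pvF acc = some r →
    (acc = some r ∨ r ∈ xs) ∧ (∀ y ∈ xs, ¬ pvLexLt y r) ∧ (∀ m0, acc = some m0 → ¬ pvLexLt m0 r) := by
  induction xs with
  | nil =>
    intro acc r h
    simp only [List.foldl_nil] at h
    refine ⟨Or.inl h, by simp, ?_⟩
    intro m0 hm0
    rw [h] at hm0
    cases hm0
    exact pvLexLt_irrefl r
  | cons x t ih =>
    intro acc r h
    simp only [List.foldl_cons] at h
    obtain ⟨hmem, hmin, hacc⟩ := ih (pvF acc x) r h
    have hx : ¬ pvLexLt x r := by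
      cases acc with
      | none =>
        exact hacc x rfl
      | some m =>
        by_cases hlt : pvLexLt x m
        · exact hacc x (pvF_some_pos hlt)
        · exact pvLexLt_not_trans (hacc m (pvF_some_neg hlt)) hlt
    refine ⟨?_, ?_, ?_⟩
    · cases hmem with
      | inl he =>
        cases acc with
        | none =>
          simp only [pvF] at he; cases he; exact Or.inr (List.mem_cons_self)
        | some m =>
          by_cases hlt : pvLexLt x m
          · rw [pvF_some_pos hlt] at he; cases he; exact Or.inr (List.mem_cons_self)
          · rw [pvF_some_neg hlt] at he; exact Or.inl he
      | inr hm => exact Or.inr (List.mem_cons_of_mem x hm)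
    · intro y hy
      rcases List.mem_cons.mp hy with hy | hy
      · rw [hy]; exact hx
      · exact hmin y hy
    · intro m0 hm0
      cases hm0
      by_cases hlt : pvLexLt m0 x
      · -- acc = some m0, step picked... if pvLexLt x m0 then new acc = some x; else some m0
        by_cases hxl : pvLexLt x m0
        · -- new acc some x, ¬ lexLt x r; m0 "above" x: ¬ lexLt m0 r since r ≤lex x <lex m0? no: x <lex m0
          -- r ≤lex x (¬ lexLt x r means r ≤ x? no: ¬(x < r) means r ≤ x). and x < m0, so r ≤ x < m0, hence ¬(m0 < r)
          intro hc
          unfold pvLexLt at hc hx hxl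
          omega
        · exact hacc m0 (pvF_some_neg hxl)
      · by_cases hxl : pvLexLt x m0
        · intro hc
          unfold pvLexLt at hc hx hxl
          omega
        · exact hacc m0 (pvF_some_neg hxl)

theorem min2?_eq_of_lexmin (xs : List (Int × Int)) (c : Int × Int)
    (hc : c ∈ xs) (hmin : ∀ y ∈ xs, ¬ pvLexLt y c) :
    PySem.List.min2? xs Prod.fst Prod.snd = some c := by
  rw [min2?_eq_foldl_pvF]
  cases hr : xs.foldl pvF none with
  | none =>
    exfalso
    cases xs with
    | nil => cases hc
    | cons x t =>
      simp only [List.foldl_cons] at hr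
      have h1 : pvF none x = some x := rfl
      rw [h1] at hr
      have := pvMinFold_isSome t (some x) rfl
      rw [hr] at this
      cases this
  | some r =>
    obtain ⟨hmem, hrmin, _⟩ := pvMinFold_spec xs none r hr
    have hrx : r ∈ xs := hmem.resolve_left (by simp)
    have := pvLexLt_antisymm (hmin r hrx) (hrmin c hc)
    rw [this]

-- the canonical pair list [(ets[0], s), (ets[1], s+1), …]
def pvCanon : List Int → Int → List (Int × Int)
  | [], _ => []
  | e :: t, s => (e, s) :: pvCanon t (s + 1)

theorem pvCanon_length (ets : List Int) : ∀ s, (pvCanon ets s).length = ets.length := by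
  induction ets with
  | nil => intro s; rfl
  | cons e t ih => intro s; simp [pvCanon, ih]

theorem mem_pvCanon (ets : List Int) : ∀ (s : Int) (p : Int × Int),
    p ∈ pvCanon ets s ↔ ∃ (k : Nat), ∃ (hk : k < ets.length), p = (ets[k], s + k) := by
  induction ets with
  | nil => intro s p; simp [pvCanon]
  | cons e t ih =>
    intro s p
    simp only [pvCanon, List.mem_cons, ih]
    constructor
    · rintro (h | ⟨k, hk, h⟩)
      · exact ⟨0, by simp, by simpa using h⟩
      · refine ⟨k + 1, by simpa using hk, ?_⟩
        rw [h]
        simp only [List.getElem_cons_succ, Prod.mk.injEq]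
        exact ⟨trivial, by push_cast; ring⟩
    · rintro ⟨k, hk, h⟩
      cases k with
      | zero => left; simpa using h
      | succ k =>
        right
        refine ⟨k, by simpa using hk, ?_⟩
        rw [h]
        simp only [List.getElem_cons_succ, Prod.mk.injEq]
        exact ⟨trivial, by push_cast; ring⟩

theorem pvCanon_set (ets : List Int) : ∀ (s : Int) (j : Nat) (v : Int), j < ets.length →
    pvCanon (ets.set j v) s = (pvCanon ets s).set j (v, s + j) := by
  induction ets with
  | nil => intro s j v hj; cases hj
  | cons e t ih =>
    intro s j v hj
    cases j with
    | zero => simp [pvCanon]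
    | succ j =>
      simp only [List.set_cons_succ, pvCanon, List.set_cons_succ] at *
      rw [ih (s + 1) j v (by simpa using hj)]
      congr 2
      push_cast
      ring

theorem pvCanon_erase (ets : List Int) : ∀ (s : Int) (j : Nat) (hj : j < ets.length),
    (pvCanon ets s).erase (ets[j], s + j) = (pvCanon ets s).eraseIdx j := by
  induction ets with
  | nil => intro s j hj; cases hj
  | cons e t ih =>
    intro s j hj
    cases j with
    | zero =>
      simp only [pvCanon, List.getElem_cons_zero]
      rw [show s + (0:Nat) = s by simp]
      rw [List.erase_cons_head]
      rfl
    | succ j =>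
      simp only [pvCanon, List.getElem_cons_succ, List.eraseIdx_cons_succ]
      rw [List.erase_cons_tail]
      · rw [show s + ((j:Nat)+1 : Nat) = (s+1) + (j:Nat) by push_cast; ring]
        rw [ih (s + 1) j (by simpa using hj)]
      · simp only [beq_iff_eq, Prod.mk.injEq, not_and]
        intro _; omega

theorem set_perm_eraseIdx_append {α : Type} (l : List α) : ∀ (j : Nat) (x : α), j < l.length →
    (l.set j x).Perm (l.eraseIdx j ++ [x]) := by
  induction l with
  | nil => intro j x hj; cases hj
  | cons a t ih =>
    intro j x hj
    cases j with
    | zero =>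
      simp only [List.set_cons_zero, List.eraseIdx_cons_zero]
      exact (List.perm_append_singleton x t).symm
    | succ j =>
      simp only [List.set_cons_succ, List.eraseIdx_cons_succ, List.cons_append]
      exact (ih j x (by simpa using hj)).cons a

-- characterisation of B's argmin fold
def pvStep (ets : List Int) (j i : Int) : Int :=
  if PySem.List.pyGetD ets i 0 < PySem.List.pyGetD ets j 0 then i else j

theorem bArgmin_eq (ets : List Int) :
    bArgmin ets = (PySem.List.pyRange 1 (ets.length : Int) 1).foldl (pvStep ets) 0 := rfl

theorem argminFold_spec (ets : List Int) (n : Nat) : ∀ (a j0 : Int), j0 < a →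
    ((PySem.List.pyRange a (a + n) 1).foldl (pvStep ets) j0 = j0 ∨
      (a ≤ (PySem.List.pyRange a (a + n) 1).foldl (pvStep ets) j0 ∧
        (PySem.List.pyRange a (a + n) 1).foldl (pvStep ets) j0 < a + n)) ∧
    ∀ i : Int, (i = j0 ∨ (a ≤ i ∧ i < a + n)) →
      ¬ pvLexLt (PySem.List.pyGetD ets i 0, i)
        (PySem.List.pyGetD ets ((PySem.List.pyRange a (a + n) 1).foldl (pvStep ets) j0) 0,
          (PySem.List.pyRange a (a + n) 1).foldl (pvStep ets) j0) := by
  induction n with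
  | zero =>
    intro a j0 hj0
    rw [show a + ((0:Nat):Int) = a by simp, PySem.List.pyRange_one_eq_nil (le_refl a)]
    simp only [List.foldl_nil]
    refine ⟨by simp, ?_⟩
    rintro i (rfl | ⟨h1, h2⟩)
    · exact pvLexLt_irrefl _
    · omega
  | succ n ih =>
    intro a j0 hj0
    have hcast : a + ((n + 1 : Nat) : Int) = (a + (n : Nat)) + 1 := by push_cast; ring
    rw [hcast, PySem.List.pyRange_one_succ_right (by omega), List.foldl_append]
    simp only [List.foldl_cons, List.foldl_nil]
    obtain ⟨hmem, hmin⟩ := ih a j0 hj0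
    by_cases hlt : PySem.List.pyGetD ets (a + (n : Nat)) 0 <
        PySem.List.pyGetD ets ((PySem.List.pyRange a (a + (n : Nat)) 1).foldl (pvStep ets) j0) 0
    · rw [show pvStep ets ((PySem.List.pyRange a (a + (n : Nat)) 1).foldl (pvStep ets) j0)
          (a + (n : Nat)) = a + (n : Nat) from by rw [pvStep, if_pos hlt]]
      refine ⟨Or.inr ⟨by omega, by omega⟩, ?_⟩
      intro i hi
      by_cases hib : i = a + (n : Nat)
      · subst hib; exact pvLexLt_irrefl _
      · have hi' : i = j0 ∨ (a ≤ i ∧ i < a + (n : Nat)) := by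
          rcases hi with h | ⟨h1, h2⟩
          · exact Or.inl h
          · exact Or.inr ⟨h1, by omega⟩
        have hm := hmin i hi'
        unfold pvLexLt at hm ⊢
        simp only [not_or, not_and, not_lt] at hm ⊢
        omega
    · rw [show pvStep ets ((PySem.List.pyRange a (a + (n : Nat)) 1).foldl (pvStep ets) j0)
          (a + (n : Nat)) = (PySem.List.pyRange a (a + (n : Nat)) 1).foldl (pvStep ets) j0 from by
            rw [pvStep, if_neg hlt]]
      constructor
      · rcases hmem with h | ⟨h1, h2⟩
        · exact Or.inl h
        · exact Or.inr ⟨h1, by omega⟩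
      · intro i hi
        by_cases hib : i = a + (n : Nat)
        · subst hib
          have hJb : (PySem.List.pyRange a (a + (n : Nat)) 1).foldl (pvStep ets) j0 < a + (n : Nat) := by
            rcases hmem with h | ⟨h1, h2⟩ <;> omega
          unfold pvLexLt
          simp only [not_or, not_and, not_lt] at hlt ⊢
          omega
        · have hi' : i = j0 ∨ (a ≤ i ∧ i < a + (n : Nat)) := by
            rcases hi with h | ⟨h1, h2⟩
            · exact Or.inl h
            · exact Or.inr ⟨h1, by omega⟩
          exact hmin i hi'

theorem bArgmin_spec (ets : List Int) (hne : ets ≠ []) :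
    (0 ≤ bArgmin ets ∧ bArgmin ets < ets.length) ∧
    ∀ i : Int, 0 ≤ i → i < ets.length →
      ¬ pvLexLt (PySem.List.pyGetD ets i 0, i)
        (PySem.List.pyGetD ets (bArgmin ets) 0, bArgmin ets) := by
  have hlen : 1 ≤ ets.length := by
    cases ets with
    | nil => cases hne rfl
    | cons e t => simp
  have hcast : (ets.length : Int) = 1 + ((ets.length - 1 : Nat) : Int) := by omega
  obtain ⟨hmem, hmin⟩ := argminFold_spec ets (ets.length - 1) 1 0 (by omega)
  rw [bArgmin_eq, hcast]
  constructor
  · rcases hmem with h | ⟨h1, h2⟩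
    · rw [h]; omega
    · constructor <;> omega
  · intro i hi0 hilen
    apply hmin
    by_cases hi : i = 0
    · exact Or.inl hi
    · refine Or.inr ⟨by omega, by omega⟩

-- the main loop correspondence
theorem loopAB (users : List (Int × Int)) : ∀ (h : List (Int × Int)) (ets : List Int)
    (deploy : List (Int × Int × Int)), ets ≠ [] → h.Perm (pvCanon ets 1) →
    ∃ h', solLoopA users h deploy = some (h', solLoopB users ets deploy) := by
  induction users with
  | nil => intro h ets deploy _ _; exact ⟨h, rfl⟩
  | cons u rest ih =>
    obtain ⟨uid, pay⟩ := u
    intro h ets deploy hne hperm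
    obtain ⟨⟨hJ0, hJlen⟩, hJmin⟩ := bArgmin_spec ets hne
    have hJnat : (bArgmin ets).toNat < ets.length := by omega
    have hg : PySem.List.pyGetD ets (bArgmin ets) 0 = ets[(bArgmin ets).toNat]'hJnat := by
      rw [PySem.List.pyGetD_of_nonneg ets 0 hJ0, List.getD_eq_getElem ets 0 hJnat]
    have hc : ((PySem.List.pyGetD ets (bArgmin ets) 0, bArgmin ets + 1) : Int × Int) =
        (ets[(bArgmin ets).toNat]'hJnat, 1 + ((bArgmin ets).toNat : Int)) := by
      rw [hg]; simp only [Prod.mk.injEq]; exact ⟨by trivial, by omega⟩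
    have hcmem : (PySem.List.pyGetD ets (bArgmin ets) 0, bArgmin ets + 1) ∈ pvCanon ets 1 := by
      rw [mem_pvCanon]
      exact ⟨(bArgmin ets).toNat, hJnat, hc⟩
    have hcmin : ∀ y ∈ pvCanon ets 1,
        ¬ pvLexLt y (PySem.List.pyGetD ets (bArgmin ets) 0, bArgmin ets + 1) := by
      intro y hy
      rw [mem_pvCanon] at hy
      obtain ⟨k, hk, rfl⟩ := hy
      have hmk := hJmin (k : Int) (by omega) (by omega)
      have hgk : PySem.List.pyGetD ets (k : Int) 0 = ets[k]'hk := by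
        rw [PySem.List.pyGetD_of_nonneg ets 0 (by omega)]
        simp only [Int.toNat_natCast]
        exact List.getD_eq_getElem ets 0 hk
      rw [hgk] at hmk
      unfold pvLexLt at hmk ⊢
      simp only [not_or, not_and, not_lt] at hmk ⊢
      omega
    have hpop : PySem.List.min2? h Prod.fst Prod.snd =
        some (PySem.List.pyGetD ets (bArgmin ets) 0, bArgmin ets + 1) :=
      min2?_eq_of_lexmin h _ (hperm.mem_iff.mpr hcmem)
        (fun y hy => hcmin y (hperm.subset hy))
    have hne2 : ets.set (bArgmin ets).toNat (PySem.List.pyGetD ets (bArgmin ets) 0 + pay) ≠ [] := by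
      intro hnil
      have := congrArg List.length hnil
      rw [List.length_set] at this
      simp at this
      exact hne this
    have hperm2 : (h.erase (PySem.List.pyGetD ets (bArgmin ets) 0, bArgmin ets + 1) ++
        [(PySem.List.pyGetD ets (bArgmin ets) 0 + pay, bArgmin ets + 1)]).Perm
        (pvCanon (ets.set (bArgmin ets).toNat (PySem.List.pyGetD ets (bArgmin ets) 0 + pay)) 1) := by
      have p1 : (h.erase (PySem.List.pyGetD ets (bArgmin ets) 0, bArgmin ets + 1)).Perm
          ((pvCanon ets 1).erase (PySem.List.pyGetD ets (bArgmin ets) 0, bArgmin ets + 1)) :=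
        hperm.erase _
      have e1 : (pvCanon ets 1).erase (PySem.List.pyGetD ets (bArgmin ets) 0, bArgmin ets + 1) =
          (pvCanon ets 1).eraseIdx (bArgmin ets).toNat := by
        rw [hc]
        exact pvCanon_erase ets 1 (bArgmin ets).toNat hJnat
      have p2 := set_perm_eraseIdx_append (pvCanon ets 1) (bArgmin ets).toNat
        (PySem.List.pyGetD ets (bArgmin ets) 0 + pay, bArgmin ets + 1)
        (by rw [pvCanon_length]; exact hJnat)
      have e2 : pvCanon (ets.set (bArgmin ets).toNat (PySem.List.pyGetD ets (bArgmin ets) 0 + pay)) 1 =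
          (pvCanon ets 1).set (bArgmin ets).toNat
            (PySem.List.pyGetD ets (bArgmin ets) 0 + pay, bArgmin ets + 1) := by
        rw [pvCanon_set ets 1 (bArgmin ets).toNat _ hJnat]
        congr 2
        omega
      have q1 := p1.append_right
        [(PySem.List.pyGetD ets (bArgmin ets) 0 + pay, bArgmin ets + 1)]
      rw [e1] at q1
      rw [e2]
      exact q1.trans p2.symm
    obtain ⟨h', hrec⟩ := ih (h.erase (PySem.List.pyGetD ets (bArgmin ets) 0, bArgmin ets + 1) ++
        [(PySem.List.pyGetD ets (bArgmin ets) 0 + pay, bArgmin ets + 1)])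
      (ets.set (bArgmin ets).toNat (PySem.List.pyGetD ets (bArgmin ets) 0 + pay))
      (deploy ++ [(PySem.List.pyGetD ets (bArgmin ets) 0 + pay, bArgmin ets + 1, uid)]) hne2 hperm2
    refine ⟨h', ?_⟩
    show solLoopA ((uid, pay) :: rest) h deploy = _
    rw [solLoopA, hpop]
    rw [show solLoopB ((uid, pay) :: rest) ets deploy =
      solLoopB rest (ets.set (bArgmin ets).toNat (PySem.List.pyGetD ets (bArgmin ets) 0 + pay))
        (deploy ++ [(PySem.List.pyGetD ets (bArgmin ets) 0 + pay, bArgmin ets + 1, uid)]) from rfl]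
    exact hrec

theorem pvCanon_replicate (n : Nat) : ∀ (s : Int),
    (PySem.List.pyRange s (s + n) 1).map (fun i => ((0 : Int), i)) = pvCanon (List.replicate n (0 : Int)) s := by
  induction n with
  | zero =>
    intro s
    rw [PySem.List.pyRange_one_eq_nil (by simp)]
    rfl
  | succ n ih =>
    intro s
    rw [PySem.List.pyRange_one_cons (by omega)]
    simp only [List.map_cons, List.replicate_succ, pvCanon]
    rw [show s + ((n:Nat)+1:Nat) = (s + 1) + (n:Nat) by push_cast; ring]
    rw [ih (s + 1)]

-- ===== VERDICT (by name: the statement is the Claim_ definition above) =====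
theorem solution_spec : Claim_equal_solution := by
  intro N K users _ hpre
  unfold Spec_solution
  cases users with
  | nil => rfl
  | cons u rest =>
    have hK : 1 ≤ K := by
      rcases hpre with h | h
      · cases h
      · exact h
    unfold solution solution_alt
    have hrep : (PySem.List.pyRange 1 (K + 1) 1).map (fun i => ((0 : Int), i)) =
        pvCanon (List.replicate K.toNat 0) 1 := by
      rw [show K + 1 = 1 + (K.toNat : Int) by omega]
      exact pvCanon_replicate K.toNat 1
    have hne : List.replicate K.toNat (0:Int) ≠ [] := by
      intro hnil
      have := congrArg List.length hnil
      simp at this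
      omega
    obtain ⟨h', heq⟩ := loopAB (u :: rest) ((PySem.List.pyRange 1 (K + 1) 1).map (fun i => ((0 : Int), i)))
      (List.replicate K.toNat 0) [] hne (by rw [hrep])
    change (match solLoopA (u :: rest) ((PySem.List.pyRange 1 (K + 1) 1).map (fun i => ((0 : Int), i))) [] with
      | none => (0 : Int)
      | some (_, deploy) => pvFinish deploy) = pvFinish (solLoopB (u :: rest) (List.replicate K.toNat 0) [])
    rw [heq]
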